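-- pv_equiv track=rewrite | github.com/marckii8888/adventofcode2020 | day 6.py | solution
-- ===== SOURCE A (Python) =====
-- def solution(arr):
--     res = 0
--     for group in arr:
--         choices = []
--         for person in group:
--             for choice in person:
--                 if(choice in choices):
--                     continue
--                 else:
--                     choices.append(choice)
--                     res+=1
--     return res
-- ===== SOURCE B (Python) =====
-- def solution(arr):
--     total = 0
--     for group in arr:
--         flat = sorted(c for person in group for c in person)
--         prev = None
--         for c in flat:
--             if c != prev:
--                 total += 1
--             prev = c
--     return total
-- ===== Notes on version B (the rewrite author's own statement) =====
-- stated objective: faster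
-- what changed: Sort-then-scan: each group's answers are flattened and sorted, and a single linear pass counts boundaries between adjacent distinct values, replacing A's membership-list scan, conditional branch and incremental dedup list.
import Mathlib
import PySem

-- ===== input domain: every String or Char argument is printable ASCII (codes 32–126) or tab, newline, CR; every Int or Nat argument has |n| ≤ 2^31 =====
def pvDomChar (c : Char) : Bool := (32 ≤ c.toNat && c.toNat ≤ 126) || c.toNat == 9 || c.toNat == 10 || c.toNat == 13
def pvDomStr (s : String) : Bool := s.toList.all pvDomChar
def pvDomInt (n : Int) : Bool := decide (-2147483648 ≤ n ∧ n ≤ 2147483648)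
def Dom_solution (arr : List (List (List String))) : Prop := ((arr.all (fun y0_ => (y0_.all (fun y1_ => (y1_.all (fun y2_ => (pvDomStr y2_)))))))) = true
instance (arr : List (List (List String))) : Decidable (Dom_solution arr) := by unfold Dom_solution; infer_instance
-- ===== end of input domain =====

-- B sorts each group's flattened answers and counts boundaries between adjacent distinct
-- values in one linear scan, instead of A's per-element membership-list scan (objective: faster).

-- ===== PORT A =====
-- res = 0; for group: choices = []; for person: for choice:
--   if choice in choices: continue else: choices.append(choice); res += 1
def solution (arr : List (List (List String))) : Int :=
  arr.foldl (fun res group =>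
    (group.foldl (fun (st : List String × Int) person =>
        person.foldl (fun st2 choice =>
            if choice ∈ st2.1 then st2 else (st2.1 ++ [choice], st2.2 + 1)) st)
      ([], res)).2) 0

-- ===== PORT B =====
-- for group: flat = sorted(flattened choices); prev = None;
--   for c in flat: if c != prev: total += 1; prev = c
def solution_alt (arr : List (List (List String))) : Int :=
  arr.foldl (fun total group =>
    ((PySem.List.sorted (group.flatten) (fun x => x) false).foldl
        (fun (st : Option String × Int) c =>
          (some c, if some c ≠ st.1 then st.2 + 1 else st.2))
        (none, total)).2) 0

-- ===== PRECONDITION & SPEC =====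
def Spec_solution (arr : List (List (List String))) (out : Int) : Prop := out = solution_alt arr
instance (arr : List (List (List String))) (out : Int) : Decidable (Spec_solution arr out) := by unfold Spec_solution; infer_instance

-- ===== CLAIM (what is proved, stated in full; the proofs are below) =====
def Claim_equal_solution : Prop := ∀ (arr : List (List (List String))), Dom_solution arr → Spec_solution arr (solution arr)

-- ===== LEMMAS AND PROOFS =====

-- A's inner dedup-and-count loop is Set.add plus length bookkeeping.
lemma inner_loop (xs cs : List String) (r : Int) :
    xs.foldl (fun st2 choice =>
        if choice ∈ st2.1 then st2 else (st2.1 ++ [choice], st2.2 + 1)) (cs, r)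
      = (xs.foldl PySem.Set.add cs,
         r + ((xs.foldl PySem.Set.add cs).length : Int) - (cs.length : Int)) := by
  induction xs generalizing cs r with
  | nil => simp
  | cons x xs ih =>
    by_cases h : x ∈ cs
    · simp only [List.foldl_cons, PySem.Set.add, PySem.Set.contains,
        List.contains_eq_mem, h, decide_true, if_true]
      exact ih cs r
    · simp only [List.foldl_cons, PySem.Set.add, PySem.Set.contains,
        List.contains_eq_mem, h, decide_false, Bool.false_eq_true, if_false]
      rw [ih (cs ++ [x]) (r + 1)]
      simp; omega

-- number of distinct elements of xs, as A's Set.add fold computes it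
lemma set_fold_length (xs : List String) :
    (xs.foldl PySem.Set.add ([] : List String)).length = xs.toFinset.card := by
  have hnd : (PySem.Set.ofList xs).Nodup := PySem.Set.nodup_ofList xs
  have hmem : ∀ y, y ∈ PySem.Set.ofList xs ↔ y ∈ xs := fun y => PySem.Set.mem_ofList xs y
  have : (PySem.Set.ofList xs).toFinset = xs.toFinset := by
    ext y; simp [List.mem_toFinset, hmem]
  calc (xs.foldl PySem.Set.add ([] : List String)).length
      = (PySem.Set.ofList xs).toFinset.card := ((List.toFinset_card_of_nodup hnd)).symm
    _ = xs.toFinset.card := by rw [this]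

lemma outer_loopA (arr : List (List (List String))) (r : Int) :
    arr.foldl (fun res group =>
      (group.foldl (fun (st : List String × Int) person =>
          person.foldl (fun st2 choice =>
              if choice ∈ st2.1 then st2 else (st2.1 ++ [choice], st2.2 + 1)) st)
        ([], res)).2) r
    = r + (arr.map (fun group => ((group.flatten.toFinset.card : Nat) : Int))).sum := by
  induction arr generalizing r with
  | nil => simp
  | cons g arr ih =>
    simp only [List.foldl_cons, List.map_cons, List.sum_cons]
    rw [← List.foldl_flatten, inner_loop, ih, set_fold_length]
    simp; ring

-- B's scan over a chain-sorted tail, started with a minimal previous element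
lemma scan_sorted (ys : List String) (x : String) (t : Int)
    (hs : ys.Pairwise (· ≤ ·)) (hx : ∀ y ∈ ys, x ≤ y) :
    (ys.foldl (fun (st : Option String × Int) c =>
        (some c, if some c ≠ st.1 then st.2 + 1 else st.2)) (some x, t)).2
      = t + ((x :: ys).toFinset.card : Int) - 1 := by
  induction ys generalizing x t with
  | nil => simp
  | cons y ys ih =>
    have hs' : ys.Pairwise (· ≤ ·) := (List.pairwise_cons.mp hs).2
    have hy' : ∀ z ∈ ys, y ≤ z := (List.pairwise_cons.mp hs).1
    by_cases h : y = x
    · subst h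
      have : (y :: y :: ys).toFinset = (y :: ys).toFinset := by
        simp [List.toFinset_cons]
      simp only [List.foldl_cons, ne_eq, not_true_eq_false,
        if_false, this]
      simpa using ih y t hs' hy'
    · have hlt : ∀ z ∈ y :: ys, x < z := by
        intro z hz
        rcases List.mem_cons.mp hz with rfl | hz
        · exact lt_of_le_of_ne (hx z (List.mem_cons_self)) (Ne.symm h)
        · exact lt_of_lt_of_le
            (lt_of_le_of_ne (hx y (List.mem_cons_self)) (Ne.symm h)) (hy' z hz)
      have hnotmem : x ∉ (y :: ys).toFinset := by
        simp only [List.mem_toFinset]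
        intro hmem; exact absurd rfl (ne_of_lt (hlt x hmem))
      have hcard : ((x :: y :: ys).toFinset.card : Int)
          = ((y :: ys).toFinset.card : Int) + 1 := by
        rw [List.toFinset_cons, Finset.card_insert_of_notMem hnotmem]; push_cast; ring
      have hne : (some y : Option String) ≠ some x := by simp [h]
      simp only [List.foldl_cons, ne_eq, hne, not_false_eq_true, if_true]
      rw [ih y (t + 1) hs' hy', hcard]
      ring

-- B's per-group pass computes the number of distinct elements
lemma group_scan (xs : List String) (t : Int) :
    ((PySem.List.sorted xs (fun x => x) false).foldl
        (fun (st : Option String × Int) c =>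
          (some c, if some c ≠ st.1 then st.2 + 1 else st.2))
        (none, t)).2
      = t + (xs.toFinset.card : Int) := by
  have hperm : (PySem.List.sorted xs (fun x => x) false).Perm xs :=
    PySem.List.sorted_perm xs (fun x => x) false
  have hfin : (PySem.List.sorted xs (fun x => x) false).toFinset = xs.toFinset :=
    by ext y; simp [List.mem_toFinset, hperm.mem_iff]
  have hpw : (PySem.List.sorted xs (fun x => x) false).Pairwise (· ≤ ·) := by
    simpa using PySem.List.sorted_pairwise (xs := xs) (key := fun x => x)
  cases hsf : PySem.List.sorted xs (fun x => x) false with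
  | nil =>
    have : xs.toFinset = ∅ := by rw [← hfin, hsf]; simp
    simp [this]
  | cons m ms =>
    rw [hsf] at hpw hfin
    have hs' : ms.Pairwise (· ≤ ·) := (List.pairwise_cons.mp hpw).2
    have hm : ∀ y ∈ ms, m ≤ y := (List.pairwise_cons.mp hpw).1
    simp only [List.foldl_cons, ne_eq, reduceCtorEq, not_false_eq_true, if_true]
    rw [scan_sorted ms m (t + 1) hs' hm, ← hfin]
    ring

lemma outer_loopB (arr : List (List (List String))) (t : Int) :
    arr.foldl (fun total group =>
      ((PySem.List.sorted (group.flatten) (fun x => x) false).foldl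
          (fun (st : Option String × Int) c =>
            (some c, if some c ≠ st.1 then st.2 + 1 else st.2))
          (none, total)).2) t
    = t + (arr.map (fun group => ((group.flatten.toFinset.card : Nat) : Int))).sum := by
  induction arr generalizing t with
  | nil => simp
  | cons g arr ih =>
    simp only [List.foldl_cons, List.map_cons, List.sum_cons]
    rw [group_scan, ih]
    ring

-- ===== VERDICT (by name: the statement is the Claim_ definition above) =====
theorem solution_spec : Claim_equal_solution := by
  intro arr _
  unfold Spec_solution solution solution_alt
  rw [outer_loopA, outer_loopB]
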